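-- pv_equiv track=rewrite | github.com/Basanth08/PYTHON | sorts.py | shift_wo_swap
-- ===== SOURCE A (Python) =====
-- def shift_wo_swap(a_list,index):
--     target = a_list[index]
--     target_index = index
--     while target_index > 0 and a_list[target_index-1] > target:
--         a_list[target_index] = a_list[target_index - 1]
--         target_index -= 1
--     a_list[target_index] = target
--     return a_list
-- ===== SOURCE B (Python) =====
-- def shift_wo_swap(a_list, index):
--     target = a_list[index]
--     pos = index
--     while pos > 0 and a_list[pos - 1] > target:
--         pos -= 1
--     a_list[pos + 1:index + 1] = a_list[pos:index]
--     a_list[pos] = target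
--     return a_list
-- ===== Notes on version B (the rewrite author's own statement) =====
-- stated objective: alternative
-- what changed: A interleaves scanning and shifting in one while loop that copies elements rightward one at a time; B first locates the insertion position with a pure scan, then performs the whole shift as a single bulk slice assignment.
import Mathlib
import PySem

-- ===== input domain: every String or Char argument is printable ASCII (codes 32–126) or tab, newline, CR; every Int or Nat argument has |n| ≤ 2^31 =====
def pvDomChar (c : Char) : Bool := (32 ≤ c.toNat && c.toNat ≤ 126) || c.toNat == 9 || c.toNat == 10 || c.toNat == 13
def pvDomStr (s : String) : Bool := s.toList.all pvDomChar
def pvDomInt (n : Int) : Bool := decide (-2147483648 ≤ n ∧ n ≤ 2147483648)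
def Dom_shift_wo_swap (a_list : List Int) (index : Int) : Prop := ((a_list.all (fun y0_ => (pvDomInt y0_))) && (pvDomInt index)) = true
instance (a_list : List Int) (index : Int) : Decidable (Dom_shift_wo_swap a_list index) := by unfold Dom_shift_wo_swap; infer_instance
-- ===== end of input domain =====

-- B replaces A's interleaved scan-and-shift loop by a pure locate pass followed by one
-- bulk slice move (objective: alternative decomposition, same cost).
-- A and B mutate a_list in place identically; the theorems here are about the return value.

-- ===== PORT A =====
-- the while loop: state (a_list, target_index); returns both at exit
def shiftLoopA (l : List Int) (target : Int) (ti : Int) : List Int × Int :=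
  if _h : 0 < ti then
    match PySem.List.pyGet? l (ti - 1) with
    | some prev =>
      if prev > target then shiftLoopA (PySem.List.pySetD l ti prev) target (ti - 1)
      else (l, ti)
    | none => (l, ti)   -- unreachable: ti-1 is in range whenever the loop runs under Pre_
  else (l, ti)
termination_by ti.toNat
decreasing_by omega

def shift_wo_swap (a_list : List Int) (index : Int) : List Int :=
  match PySem.List.pyGet? a_list index with
  | none => a_list   -- Python raises IndexError here; excluded by Pre_
  | some target =>
    let s := shiftLoopA a_list target index
    PySem.List.pySetD s.1 s.2 target

-- ===== PORT B =====
-- pure locate pass: pos = index; while pos > 0 and a_list[pos-1] > target: pos -= 1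
def findPosB (l : List Int) (target : Int) (pos : Int) : Int :=
  if _h : 0 < pos then
    match PySem.List.pyGet? l (pos - 1) with
    | some prev => if prev > target then findPosB l target (pos - 1) else pos
    | none => pos
  else pos
termination_by pos.toNat
decreasing_by omega

def shift_wo_swap_alt (a_list : List Int) (index : Int) : List Int :=
  match PySem.List.pyGet? a_list index with
  | none => a_list   -- Python raises IndexError here; excluded by Pre_
  | some target =>
    let pos := findPosB a_list target index
    -- a_list[pos+1:index+1] = a_list[pos:index]
    let moved := PySem.List.slice a_list none (some (pos + 1)) ++
                 PySem.List.slice a_list (some pos) (some index) ++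
                 PySem.List.slice a_list (some (index + 1)) none
    PySem.List.pySetD moved pos target

-- ===== PRECONDITION & SPEC =====
-- exactly the inputs on which Python A returns: index in range (else a_list[index] raises IndexError)
def Pre_shift_wo_swap (a_list : List Int) (index : Int) : Prop :=
  PySem.Raise.InRange a_list.length index
instance (a_list : List Int) (index : Int) : Decidable (Pre_shift_wo_swap a_list index) := by
  unfold Pre_shift_wo_swap; infer_instance

def pvWitness_shift_wo_swap : List Int × Int := ([3, 1, 4, 1, 5], 3)

def Spec_shift_wo_swap (a_list : List Int) (index : Int) (out : List Int) : Prop := out = shift_wo_swap_alt a_list index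
instance (a_list : List Int) (index : Int) (out : List Int) : Decidable (Spec_shift_wo_swap a_list index out) := by unfold Spec_shift_wo_swap; infer_instance

-- ===== CLAIM (what is proved, stated in full; the proofs are below) =====
def Claim_equal_shift_wo_swap : Prop := ∀ (a_list : List Int) (index : Int), Dom_shift_wo_swap a_list index → Pre_shift_wo_swap a_list index → Spec_shift_wo_swap a_list index (shift_wo_swap a_list index)

-- ===== LEMMAS AND PROOFS =====

-- loop invariant shape: the list A's loop holds when target_index = t, starting from a at index j
def pvMk (a : List Int) (j t : Nat) : List Int :=
  a.take (t+1) ++ (a.drop t).take (j - t) ++ a.drop (j+1)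

lemma pv_slice_self (xs : List Int) (i : Int) : PySem.List.slice xs (some i) (some i) = [] := by
  apply List.eq_nil_of_length_eq_zero
  rw [PySem.List.length_slice]
  omega

lemma pvMk_self (a : List Int) (j : Nat) : pvMk a j j = a := by
  unfold pvMk
  simp

lemma pvMk_set (a : List Int) (j s : Nat) (h1 : s + 1 ≤ j) (h2 : j < a.length) :
    (pvMk a j (s+1)).set (s+1) (a[s]'(by omega)) = pvMk a j s := by
  unfold pvMk
  rw [List.append_assoc, List.append_assoc]
  have hts : s + 1 < (a.take (s+1+1)).length := by
    rw [List.length_take]; omega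
  rw [List.set_append_left _ _ hts]
  have htake : a.take (s+1+1) = a.take (s+1) ++ [a[s+1]'(by omega)] := by
    rw [List.take_add_one, List.getElem?_eq_getElem (by omega)]
    rfl
  rw [htake, List.set_append_right _ _ (by simp)]
  have hlen : (a.take (s+1)).length = s + 1 := by rw [List.length_take]; omega
  rw [hlen, Nat.sub_self]
  have hdrop : a.drop s = a[s]'(by omega) :: a.drop (s+1) := List.drop_eq_getElem_cons (by omega)
  have hjs : j - s = (j - (s+1)) + 1 := by omega
  rw [hdrop, hjs, List.take_succ_cons]
  simp [List.append_assoc]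

lemma pvMk_getElem? (a : List Int) (j s : Nat) (h1 : s + 1 ≤ j) (h2 : j < a.length) :
    (pvMk a j (s+1))[s]? = some (a[s]'(by omega)) := by
  unfold pvMk
  rw [List.append_assoc]
  rw [List.getElem?_append_left (by rw [List.length_take]; omega)]
  rw [List.getElem?_take, if_pos (by omega), List.getElem?_eq_getElem (by omega)]

-- the two loops run in lockstep: A's mutated list stays in pvMk shape while B only tracks the position
lemma pv_loop_rel (a : List Int) (target : Int) (j : Nat) (hj : j < a.length) :
    ∀ t : Nat, t ≤ j →
      shiftLoopA (pvMk a j t) target (t : Int) =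
        (pvMk a j ((findPosB a target (t : Int)).toNat), findPosB a target (t : Int))
      ∧ 0 ≤ findPosB a target (t : Int) := by
  intro t
  induction t with
  | zero =>
    intro _
    rw [shiftLoopA, findPosB]
    simp
  | succ s ih =>
    intro hle
    have hs : s < a.length := by omega
    have hcast : ((s+1 : Nat) : Int) - 1 = (s : Int) := by push_cast; ring
    have hget_a : PySem.List.pyGet? a (((s+1 : Nat) : Int) - 1) = some (a[s]'hs) := by
      rw [hcast, PySem.List.pyGet?_natCast, List.getElem?_eq_getElem hs]
    have hget_mk : PySem.List.pyGet? (pvMk a j (s+1)) (((s+1 : Nat) : Int) - 1)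
        = some (a[s]'hs) := by
      rw [hcast, PySem.List.pyGet?_natCast, pvMk_getElem? a j s hle hj]
    rw [shiftLoopA, findPosB]
    rw [dif_pos (by positivity), dif_pos (by positivity)]
    rw [hget_a, hget_mk]
    by_cases hcmp : a[s]'hs > target
    · simp only [if_pos hcmp]
      rw [PySem.List.pySetD_natCast, pvMk_set a j s hle hj, hcast]
      exact ih (by omega)
    · simp only [if_neg hcmp]
      refine ⟨?_, by positivity⟩
      rw [Int.toNat_natCast]

-- ===== VERDICT (by name: the statement is the Claim_ definition above) =====
theorem shift_wo_swap_spec : Claim_equal_shift_wo_swap := by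
  intro a index _ hPre
  unfold Spec_shift_wo_swap
  have hR : -(a.length : Int) ≤ index ∧ index < (a.length : Int) := hPre
  obtain ⟨hlo, hhi⟩ := hR
  by_cases hneg : index < 0
  · -- negative index: neither loop runs; B's bulk move is the identity
    obtain ⟨target, hT⟩ : ∃ t, PySem.List.pyGet? a index = some t := by
      cases h : PySem.List.pyGet? a index with
      | none =>
        rw [PySem.List.pyGet?_eq_none_iff] at h
        exact absurd ⟨hlo, hhi⟩ h
      | some t => exact ⟨t, rfl⟩
    unfold shift_wo_swap shift_wo_swap_alt
    rw [hT]
    dsimp only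
    have hloop : shiftLoopA a target index = (a, index) := by
      rw [shiftLoopA, dif_neg (by omega)]
    have hfind : findPosB a target index = index := by
      rw [findPosB, dif_neg (by omega)]
    rw [hloop, hfind]
    have hmoved : PySem.List.slice a none (some (index + 1)) ++
        PySem.List.slice a (some index) (some index) ++
        PySem.List.slice a (some (index + 1)) none = a := by
      rw [pv_slice_self]
      by_cases h1 : index + 1 = 0
      · rw [h1, PySem.List.slice_to _ (by omega), PySem.List.slice_from _ (by omega)]
        simp
      · set k : Nat := (-(index + 1)).toNat with hk
        have hkk : index + 1 = -(k : Int) := by omega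
        have hkpos : 0 < k := by omega
        rw [hkk, PySem.List.slice_to_neg_natCast _ _ hkpos,
          PySem.List.slice_from_neg_natCast _ _ hkpos]
        simp
    simp only [hmoved]
  · -- 0 ≤ index: run the lockstep loop lemma at t = index
    set j : Nat := index.toNat with hjdef
    have hj : index = (j : Int) := by omega
    have hjlen : j < a.length := by omega
    obtain ⟨hloop, hpos0⟩ := pv_loop_rel a (a[j]'hjlen) j hjlen j le_rfl
    rw [pvMk_self] at hloop
    have hT : PySem.List.pyGet? a index = some (a[j]'hjlen) := by
      rw [hj, PySem.List.pyGet?_natCast, List.getElem?_eq_getElem hjlen]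
    unfold shift_wo_swap shift_wo_swap_alt
    rw [hT]
    dsimp only
    set p : Nat := (findPosB a (a[j]'hjlen) (j : Int)).toNat with hpdef
    have hp : findPosB a (a[j]'hjlen) (j : Int) = (p : Int) := by omega
    rw [hj, hloop, hp]
    have hmoved : PySem.List.slice a none (some ((p : Int) + 1)) ++
        PySem.List.slice a (some (p : Int)) (some (j : Int)) ++
        PySem.List.slice a (some ((j : Int) + 1)) none = pvMk a j p := by
      unfold pvMk
      have h1 : ((p : Int) + 1) = ((p + 1 : Nat) : Int) := by push_cast; ring
      have h2 : ((j : Int) + 1) = ((j + 1 : Nat) : Int) := by push_cast; ring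
      rw [h1, h2, PySem.List.slice_to_natCast, PySem.List.slice_natCast,
        PySem.List.slice_from_natCast]
    rw [hmoved]
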